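-- pv_equiv track=rewrite | github.com/ivanillera/TP1Sintaxis | Lexer.py | a_braclose
-- ===== SOURCE A (Python) =====
-- TRAMPA = -1
--
-- RESULTADO_ACEPTADO = "ACEPTADO"
--
-- RESULTADO_TRAMPA = "TRAMPA"
--
-- RESULTADO_NO_ACEPTADO = "NO_ACEPTADO"
--
-- def d_braclose(estado_anterior, caracter):
-- 	if estado_anterior == 0 and caracter == "}":
-- 		return 1
--
--
-- 	return RESULTADO_TRAMPA
--
-- def a_braclose(cadena):
-- 	Finales = [1]
-- 	estado_actual = 0
--
-- 	for caracter in cadena: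
-- 		estado_proximo = d_braclose(estado_actual, caracter)
-- 		if estado_proximo == TRAMPA:
-- 			return RESULTADO_TRAMPA
-- 		estado_actual = estado_proximo
--
-- 	if estado_actual in Finales:
-- 		return RESULTADO_ACEPTADO
-- 	else:
-- 		return RESULTADO_NO_ACEPTADO
-- ===== SOURCE B (Python) =====
-- TRAMPA = -1
-- RESULTADO_ACEPTADO = "ACEPTADO"
-- RESULTADO_TRAMPA = "TRAMPA"
-- RESULTADO_NO_ACEPTADO = "NO_ACEPTADO"
--
-- def a_braclose(cadena):
--     # A never returns RESULTADO_TRAMPA (its trap test compares a string to -1),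
--     # so acceptance is simply: the input is exactly one character, "}".
--     chars = list(cadena)
--     return RESULTADO_ACEPTADO if chars == ["}"] else RESULTADO_NO_ACEPTADO
-- ===== Notes on version B (the rewrite author's own statement) =====
-- stated objective: simpler
-- what changed: Replaced the state-transition DFA loop (whose trap branch is dead code because it compares the string 'TRAMPA' to the integer -1) by a direct comparison of the materialized character list with ["}"]. (constant-factor speedup: no per-character Python function call)
import Mathlib
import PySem

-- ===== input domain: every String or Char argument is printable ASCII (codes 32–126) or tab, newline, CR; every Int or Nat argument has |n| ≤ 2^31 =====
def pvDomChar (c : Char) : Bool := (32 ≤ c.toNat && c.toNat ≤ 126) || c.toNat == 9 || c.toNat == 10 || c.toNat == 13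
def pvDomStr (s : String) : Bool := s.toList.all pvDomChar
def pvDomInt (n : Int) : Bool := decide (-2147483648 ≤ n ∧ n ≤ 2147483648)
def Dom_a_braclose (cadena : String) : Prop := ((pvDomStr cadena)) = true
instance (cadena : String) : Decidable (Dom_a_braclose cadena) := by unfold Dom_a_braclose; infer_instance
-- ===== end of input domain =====

-- B replaces A's dead-trap DFA loop by a direct comparison of the character list with ["}"] (simpler; return value only).
-- ===== PORT A =====
-- transition function: returns int 1 or the string "TRAMPA" (a Python int-or-string value)
def d_braclose (estado_anterior : Sum Int String) (caracter : Char) : Sum Int String :=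
  if estado_anterior = Sum.inl 0 ∧ caracter = '}' then Sum.inl 1 else Sum.inr "TRAMPA"

-- the DFA loop with A's early-return trap check (estado_proximo == -1, which never fires)
def aBracloseLoop (estado_actual : Sum Int String) : List Char → String
  | [] => if estado_actual = Sum.inl 1 then "ACEPTADO" else "NO_ACEPTADO"
  | caracter :: rest =>
      let estado_proximo := d_braclose estado_actual caracter
      if estado_proximo = Sum.inl (-1) then "TRAMPA" else aBracloseLoop estado_proximo rest

def a_braclose (cadena : String) : String := aBracloseLoop (Sum.inl 0) cadena.toList

-- ===== PORT B =====
def a_braclose_alt (cadena : String) : String :=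
  if cadena.toList = ['}'] then "ACEPTADO" else "NO_ACEPTADO"

-- ===== PRECONDITION & SPEC =====
def Spec_a_braclose (cadena : String) (out : String) : Prop := out = a_braclose_alt cadena
instance (cadena : String) (out : String) : Decidable (Spec_a_braclose cadena out) := by unfold Spec_a_braclose; infer_instance

-- ===== CLAIM (what is proved, stated in full; the proofs are below) =====
def Claim_equal_a_braclose : Prop := ∀ (cadena : String), Dom_a_braclose cadena → Spec_a_braclose cadena (a_braclose cadena)

-- ===== LEMMAS AND PROOFS =====

-- ===== VERDICT (by name: the statement is the Claim_ definition above) =====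
-- once the state is a string, every further step stays a string and the run ends NO_ACEPTADO
theorem loop_inr (s : String) (l : List Char) : aBracloseLoop (Sum.inr s) l = "NO_ACEPTADO" := by
  induction l generalizing s with
  | nil => simp [aBracloseLoop]
  | cons c cs ih => simp [aBracloseLoop, d_braclose]; exact ih _

theorem a_braclose_spec : Claim_equal_a_braclose := by
  intro cadena _
  unfold Spec_a_braclose a_braclose a_braclose_alt
  cases h : cadena.toList with
  | nil => simp [aBracloseLoop]
  | cons c cs =>
      by_cases hc : c = '}'
      · subst hc
        rcases cs with _ | ⟨d, ds⟩ <;> simp [aBracloseLoop, d_braclose, loop_inr]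
      · simp [aBracloseLoop, d_braclose, hc, loop_inr]
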